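-- pv_equiv track=rewrite | github.com/sanjaya-panigrahi/self-learning-console | app/retrieval/service/__init__.py | _promote_preferred_sources
-- ===== SOURCE A (Python) =====
-- def _promote_preferred_sources(
--     contexts: list[dict[str, str]],
--     preferred_sources: list[str],
--     top_k: int,
-- ) -> list[dict[str, str]]:
--     if not contexts:
--         return []
--
--     preferred_set = {source.strip() for source in preferred_sources if source.strip()}
--     unique_contexts: list[dict[str, str]] = []
--     seen_chunks: set[tuple[str, str]] = set()
--     for context in contexts:
--         source = str(context.get("source", ""))
--         chunk_id = str(context.get("chunk_id", ""))
--         key = (source, chunk_id)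
--         if key in seen_chunks:
--             continue
--         seen_chunks.add(key)
--         unique_contexts.append(context)
--
--     if not preferred_set:
--         return unique_contexts[:top_k]
--
--     preferred: list[dict[str, str]] = []
--     others: list[dict[str, str]] = []
--     for context in unique_contexts:
--         if str(context.get("source", "")) in preferred_set:
--             preferred.append(context)
--         else:
--             others.append(context)
--
--     selected: list[dict[str, str]] = []
--     selected_keys: set[tuple[str, str]] = set()
--     used_sources: set[str] = set()
--
--     # First pass: maximize source diversity while preferring acronym-definition sources.
--     for bucket in (preferred, others):
--         for context in bucket:
--             source = str(context.get("source", ""))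
--             key = (source, str(context.get("chunk_id", "")))
--             if source in used_sources or key in selected_keys:
--                 continue
--             selected.append(context)
--             selected_keys.add(key)
--             used_sources.add(source)
--             if len(selected) >= top_k:
--                 return selected
--
--     # Second pass: fill remaining slots by rank order.
--     for context in preferred + others:
--         source = str(context.get("source", ""))
--         key = (source, str(context.get("chunk_id", "")))
--         if key in selected_keys:
--             continue
--         selected.append(context)
--         selected_keys.add(key)
--         if len(selected) >= top_k:
--             break
--
--     return selected
-- ===== SOURCE B (Python) =====
-- def _promote_preferred_sources(contexts, preferred_sources, top_k):
--     if not contexts: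
--         return []
--
--     preferred_set = {s.strip() for s in preferred_sources if s.strip()}
--
--     # Dedup by (source, chunk_id), keeping the first occurrence.
--     uniq = {}
--     for c in contexts:
--         k = (str(c.get("source", "")), str(c.get("chunk_id", "")))
--         if k not in uniq:
--             uniq[k] = c
--     unique_contexts = list(uniq.values())
--
--     if not preferred_set:
--         return unique_contexts[:top_k]
--
--     # First chunk seen per source: that context is the source's diversity representative.
--     rep = {}
--     for c in unique_contexts:
--         s = str(c.get("source", ""))
--         if s not in rep:
--             rep[s] = str(c.get("chunk_id", ""))
--
--     def priority(c):
--         phase = 0 if rep[str(c.get("source", ""))] == str(c.get("chunk_id", "")) else 1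
--         pref = 0 if str(c.get("source", "")) in preferred_set else 1
--         return 2 * phase + pref
--
--     # Stable sort: one representative per source first (preferred sources ahead),
--     # then the remaining chunks (preferred sources ahead), original order within a class.
--     ordered = sorted(unique_contexts, key=priority)
--
--     selected = []
--     for c in ordered:
--         selected.append(c)
--         if len(selected) >= top_k:
--             break
--     return selected
-- ===== Notes on version B (the rewrite author's own statement) =====
-- stated objective: alternative
-- what changed: Replaces A's partition plus two interleaved early-returning selection passes with a schedule-by-sorting algorithm: after a dict-keyed dedup it records each source's first chunk (its diversity representative), assigns every context a numeric priority 2*phase+pref, stable-sorts once by that key, and truncates with a single append-then-break loop.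
import Mathlib
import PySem

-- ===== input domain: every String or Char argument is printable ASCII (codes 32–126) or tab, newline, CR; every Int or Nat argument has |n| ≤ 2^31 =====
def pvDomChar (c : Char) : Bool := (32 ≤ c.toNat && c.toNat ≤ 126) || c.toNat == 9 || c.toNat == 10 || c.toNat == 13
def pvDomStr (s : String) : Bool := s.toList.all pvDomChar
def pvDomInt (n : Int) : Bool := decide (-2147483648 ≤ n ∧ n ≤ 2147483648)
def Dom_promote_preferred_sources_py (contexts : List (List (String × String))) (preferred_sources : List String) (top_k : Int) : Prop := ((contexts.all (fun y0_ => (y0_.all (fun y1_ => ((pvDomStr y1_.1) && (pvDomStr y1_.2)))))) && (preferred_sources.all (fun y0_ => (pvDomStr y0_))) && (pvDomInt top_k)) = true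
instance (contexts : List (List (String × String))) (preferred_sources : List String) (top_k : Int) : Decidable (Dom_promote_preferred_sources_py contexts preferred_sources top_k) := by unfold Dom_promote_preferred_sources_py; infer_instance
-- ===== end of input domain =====

-- B replaces A's partition and two interleaved early-returning selection passes by a schedule-by-sorting
-- algorithm: record each source's first chunk (its representative), give every context a numeric
-- priority 2*phase+pref, stable-sort once by that key and truncate (objective: alternative).

-- shared accessors for the context dicts (context.get("source", "") / context.get("chunk_id", ""))
def pvSrc (c : List (String × String)) : String := PySem.Dict.getD (PySem.Dict.mk c) "source" ""
def pvChunk (c : List (String × String)) : String := PySem.Dict.getD (PySem.Dict.mk c) "chunk_id" ""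
def pvKey (c : List (String × String)) : String × String := (pvSrc c, pvChunk c)

-- the preferred_set comprehension {source.strip() for source in preferred_sources if source.strip()}
def pvPset (preferred_sources : List String) : PySem.Set String :=
  preferred_sources.foldl
    (fun s src => if PySem.Str.strip src ≠ "" then PySem.Set.add s (PySem.Str.strip src) else s)
    PySem.Set.empty

-- ===== PORT A =====
abbrev PvCtx := List (String × String)

-- A's dedup loop over contexts (unique_contexts / seen_chunks)
def pvA_dedup : List PvCtx → List PvCtx × PySem.Set (String × String) → List PvCtx × PySem.Set (String × String)
  | [], st => st
  | c :: rest, (unique, seen) =>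
    if PySem.Set.contains seen (pvKey c) then pvA_dedup rest (unique, seen)
    else pvA_dedup rest (unique ++ [c], PySem.Set.add seen (pvKey c))

-- A's first selection pass over one bucket: Sum.inr = early `return selected`, Sum.inl = loop finished
def pvA_pass1 (top_k : Int) : List PvCtx → List PvCtx × PySem.Set (String × String) × PySem.Set String →
    (List PvCtx × PySem.Set (String × String) × PySem.Set String) ⊕ List PvCtx
  | [], st => Sum.inl st
  | c :: rest, (sel, keys, used) =>
    if PySem.Set.contains used (pvSrc c) || PySem.Set.contains keys (pvKey c) then
      pvA_pass1 top_k rest (sel, keys, used)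
    else
      let sel' := sel ++ [c]
      if PySem.List.len sel' ≥ top_k then Sum.inr sel'
      else pvA_pass1 top_k rest (sel', PySem.Set.add keys (pvKey c), PySem.Set.add used (pvSrc c))

-- A's second pass (fill by rank order, `break` once len(selected) >= top_k)
def pvA_pass2 (top_k : Int) : List PvCtx → List PvCtx × PySem.Set (String × String) → List PvCtx
  | [], st => st.1
  | c :: rest, (sel, keys) =>
    if PySem.Set.contains keys (pvKey c) then pvA_pass2 top_k rest (sel, keys)
    else
      let sel' := sel ++ [c]
      if PySem.List.len sel' ≥ top_k then sel'
      else pvA_pass2 top_k rest (sel', PySem.Set.add keys (pvKey c))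

def promote_preferred_sources_py (contexts : List (List (String × String))) (preferred_sources : List String) (top_k : Int) : List (List (String × String)) :=
  if contexts = [] then []
  else
    let pset := pvPset preferred_sources
    let unique := (pvA_dedup contexts ([], PySem.Set.empty)).1
    if pset = [] then PySem.List.slice unique none (some top_k)
    else
      let pr := unique.foldl
        (fun (st : List PvCtx × List PvCtx) c =>
          if PySem.Set.contains pset (pvSrc c) then (st.1 ++ [c], st.2) else (st.1, st.2 ++ [c]))
        ([], [])
      let preferred := pr.1
      let others := pr.2
      match pvA_pass1 top_k preferred ([], PySem.Set.empty, PySem.Set.empty) with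
      | Sum.inr sel => sel
      | Sum.inl st1 =>
        match pvA_pass1 top_k others st1 with
        | Sum.inr sel => sel
        | Sum.inl (sel, keys, _) => pvA_pass2 top_k (preferred ++ others) (sel, keys)

-- ===== PORT B =====
-- B's dedup dict build (uniq[key] = context on first occurrence)
def pvB_dedup : List PvCtx → PySem.Dict (String × String) PvCtx → PySem.Dict (String × String) PvCtx
  | [], d => d
  | c :: rest, d =>
    if d.contains (pvKey c) then pvB_dedup rest d
    else pvB_dedup rest (d.insert (pvKey c) c)

-- B's rep loop: first chunk_id seen per source
def pvB_rep : List PvCtx → PySem.Dict String String → PySem.Dict String String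
  | [], d => d
  | c :: rest, d =>
    if d.contains (pvSrc c) then pvB_rep rest d
    else pvB_rep rest (d.insert (pvSrc c) (pvChunk c))

-- B's priority(c) = 2*phase + pref.  Python's rep[s] lookup cannot fail (every source of
-- unique_contexts is a key of rep), so it is ported as getD with an unused default "".
def pvB_prio (pset : PySem.Set String) (rep : PySem.Dict String String) (c : PvCtx) : Int :=
  (if PySem.Dict.getD rep (pvSrc c) "" == pvChunk c then (0 : Int) else 1) * 2 +
    (if PySem.Set.contains pset (pvSrc c) then (0 : Int) else 1)

-- B's truncation loop: append, then break once len(selected) >= top_k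
def pvB_trunc (top_k : Int) : List PvCtx → List PvCtx → List PvCtx
  | [], sel => sel
  | c :: rest, sel =>
    let sel' := sel ++ [c]
    if PySem.List.len sel' ≥ top_k then sel' else pvB_trunc top_k rest sel'

def promote_preferred_sources_py_alt (contexts : List (List (String × String))) (preferred_sources : List String) (top_k : Int) : List (List (String × String)) :=
  if contexts = [] then []
  else
    let pset := pvPset preferred_sources
    let unique := (pvB_dedup contexts PySem.Dict.empty).values
    if pset = [] then PySem.List.slice unique none (some top_k)
    else
      let rep := pvB_rep unique PySem.Dict.empty
      pvB_trunc top_k (PySem.List.sorted unique (pvB_prio pset rep) false) []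

-- ===== PRECONDITION & SPEC =====
def Spec_promote_preferred_sources_py (contexts : List (List (String × String))) (preferred_sources : List String) (top_k : Int) (out : List (List (String × String))) : Prop := out = promote_preferred_sources_py_alt contexts preferred_sources top_k
instance (contexts : List (List (String × String))) (preferred_sources : List String) (top_k : Int) (out : List (List (String × String))) : Decidable (Spec_promote_preferred_sources_py contexts preferred_sources top_k out) := by unfold Spec_promote_preferred_sources_py; infer_instance

-- ===== CLAIM (what is proved, stated in full; the proofs are below) =====
def Claim_equal_promote_preferred_sources_py : Prop := ∀ (contexts : List (List (String × String))) (preferred_sources : List String) (top_k : Int), Dom_promote_preferred_sources_py contexts preferred_sources top_k → Spec_promote_preferred_sources_py contexts preferred_sources top_k (promote_preferred_sources_py contexts preferred_sources top_k)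

-- ===== LEMMAS AND PROOFS =====

-- proof-only model of A's diversity split: pvSp R used = (phase1, phase2, final seen set)
def pvSp : List PvCtx → PySem.Set String → List PvCtx × List PvCtx × PySem.Set String
  | [], used => ([], [], used)
  | c :: rest, used =>
    if PySem.Set.contains used (pvSrc c) then
      let r := pvSp rest used
      (r.1, c :: r.2.1, r.2.2)
    else
      let r := pvSp rest (PySem.Set.add used (pvSrc c))
      (c :: r.1, r.2.1, r.2.2)

-- proof-only truncation with an "early stop" flag: inr = stopped (len >= top_k), inl = list exhausted
def pvTruncE (top_k : Int) : List PvCtx → List PvCtx → List PvCtx ⊕ List PvCtx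
  | [], sel => Sum.inl sel
  | c :: rest, sel =>
    let sel' := sel ++ [c]
    if PySem.List.len sel' ≥ top_k then Sum.inr sel' else pvTruncE top_k rest sel'

-- "is c the first context of its source in X": B's phase test, stated via find?
def pvFirstWrt (X : List PvCtx) (c : PvCtx) : Bool :=
  ((X.find? (fun d => pvSrc d == pvSrc c)).map (fun d => pvKey d == pvKey c)).getD false

-- Set.contains is membership (strings / pairs have lawful BEq)
lemma pvContains_iff {α : Type} [BEq α] [LawfulBEq α] (s : PySem.Set α) (x : α) :
    PySem.Set.contains s x = true ↔ x ∈ s := by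
  simp [PySem.Set.contains]

lemma pvSp_append (xs ys : List PvCtx) (used : PySem.Set String) :
    pvSp (xs ++ ys) used =
      ((pvSp xs used).1 ++ (pvSp ys (pvSp xs used).2.2).1,
       (pvSp xs used).2.1 ++ (pvSp ys (pvSp xs used).2.2).2.1,
       (pvSp ys (pvSp xs used).2.2).2.2) := by
  induction xs generalizing used with
  | nil => simp [pvSp]
  | cons c rest ih =>
    by_cases h : pvSrc c ∈ used <;>
      simp [List.cons_append, pvSp, pvContains_iff, h, ih]

lemma pvSp_used_mono (R : List PvCtx) (used : PySem.Set String) (s : String)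
    (h : s ∈ used) : s ∈ (pvSp R used).2.2 := by
  induction R generalizing used with
  | nil => simpa [pvSp]
  | cons c rest ih =>
    by_cases hc : pvSrc c ∈ used
    · simpa [pvSp, pvContains_iff, hc] using ih _ h
    · simp only [pvSp, pvContains_iff, hc, decide_false, Bool.false_eq_true, if_false]
      exact ih _ ((PySem.Set.mem_add used (pvSrc c) s).mpr (Or.inl h))

lemma pvSp_p1_src_mem (R : List PvCtx) (used : PySem.Set String) :
    ∀ c ∈ (pvSp R used).1, pvSrc c ∈ (pvSp R used).2.2 := by
  induction R generalizing used with
  | nil => simp [pvSp]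
  | cons c rest ih =>
    by_cases hc : pvSrc c ∈ used
    · simpa [pvSp, pvContains_iff, hc] using ih used
    · simp only [pvSp, pvContains_iff, hc, decide_false, Bool.false_eq_true, if_false]
      intro x hx
      rcases List.mem_cons.mp hx with rfl | hx
      · exact pvSp_used_mono _ _ _ ((PySem.Set.mem_add _ _ _).mpr (Or.inr rfl))
      · exact ih _ x hx

-- sources of the final seen set come from the initial set or the scanned list
lemma pvSp_used_sub (R : List PvCtx) : ∀ (used : PySem.Set String) (s : String),
    s ∈ (pvSp R used).2.2 → s ∈ used ∨ s ∈ R.map pvSrc := by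
  induction R with
  | nil => intro used s h; left; simpa [pvSp] using h
  | cons c rest ih =>
    intro used s h
    by_cases hc : pvSrc c ∈ used
    · have h' : s ∈ (pvSp rest used).2.2 := by
        simpa [pvSp, pvContains_iff, hc] using h
      rcases ih used s h' with h'' | h''
      · exact Or.inl h''
      · exact Or.inr (by simp only [List.map_cons, List.mem_cons]; exact Or.inr h'')
    · have h' : s ∈ (pvSp rest (PySem.Set.add used (pvSrc c))).2.2 := by
        simpa [pvSp, pvContains_iff, hc] using h
      rcases ih _ s h' with h'' | h''
      · rcases (PySem.Set.mem_add _ _ _).mp h'' with h3 | h3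
        · exact Or.inl h3
        · exact Or.inr (by simp only [List.map_cons, List.mem_cons]; exact Or.inl h3)
      · exact Or.inr (by simp only [List.map_cons, List.mem_cons]; exact Or.inr h'')

-- A's partition foldl is the two filters
lemma pvPartition_fold (pset : PySem.Set String) (u : List PvCtx) (p o : List PvCtx) :
    u.foldl
      (fun (st : List PvCtx × List PvCtx) c =>
        if PySem.Set.contains pset (pvSrc c) then (st.1 ++ [c], st.2) else (st.1, st.2 ++ [c]))
      (p, o) =
      (p ++ u.filter (fun c => PySem.Set.contains pset (pvSrc c)),
       o ++ u.filter (fun c => !(PySem.Set.contains pset (pvSrc c)))) := by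
  induction u generalizing p o with
  | nil => simp
  | cons c rest ih =>
    rw [List.foldl_cons]; dsimp only
    by_cases h : pvSrc c ∈ pset
    · rw [if_pos ((pvContains_iff pset (pvSrc c)).mpr h), ih]
      simp [List.filter_cons, pvContains_iff, h, List.append_assoc]
    · rw [if_neg (fun hc => h ((pvContains_iff _ _).mp hc)), ih]
      simp [List.filter_cons, pvContains_iff, h, List.append_assoc]

-- A's set-based dedup = B's dict-based dedup (values)
lemma pvDedup_eq (cs : List PvCtx) : ∀ (u : List PvCtx) (seen : PySem.Set (String × String))
    (d : PySem.Dict (String × String) PvCtx),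
    d.values = u → d.keys = seen →
    (pvA_dedup cs (u, seen)).1 = (pvB_dedup cs d).values := by
  induction cs with
  | nil => intro u seen d hv hk; simpa [pvA_dedup, pvB_dedup] using hv.symm
  | cons c rest ih =>
    intro u seen d hv hk
    simp only [pvA_dedup, pvB_dedup]
    rcases hb : d.contains (pvKey c) with _ | _
    · have hnm : pvKey c ∉ d.keys := fun hm =>
        absurd ((PySem.Dict.contains_iff_mem_keys d _).mpr hm) (by simp [hb])
      have hs : PySem.Set.contains seen (pvKey c) = false := by
        rw [← hk, ← Bool.not_eq_true]
        simpa [pvContains_iff] using hnm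
      rw [if_neg (by rw [Bool.not_eq_true]; exact hs), if_neg Bool.false_ne_true]
      refine ih _ _ _ ?_ ?_
      · rw [show (d.insert (pvKey c) c).values = d.values ++ [c] from by
          simp [PySem.Dict.values, PySem.Dict.items_insert_of_not_contains d c hb], hv]
      · rw [PySem.Dict.keys_insert_of_not_contains d c hb, hk]
        have hnot : pvKey c ∉ seen := hk ▸ hnm
        simp [PySem.Set.add, hnot]
    · have hs : PySem.Set.contains seen (pvKey c) = true := by
        rw [← hk, pvContains_iff]
        exact (PySem.Dict.contains_iff_mem_keys d _).mp hb
      rw [if_pos hs, if_pos rfl]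
      exact ih u seen d hv hk

lemma pvDedup_nodup (cs : List PvCtx) : ∀ (u : List PvCtx) (seen : PySem.Set (String × String)),
    seen = u.map pvKey → (u.map pvKey).Nodup →
    ((pvA_dedup cs (u, seen)).1.map pvKey).Nodup := by
  induction cs with
  | nil => intro u seen hs hn; simpa [pvA_dedup]
  | cons c rest ih =>
    intro u seen hs hn
    simp only [pvA_dedup]
    by_cases h : PySem.Set.contains seen (pvKey c) = true
    · rw [if_pos h]; exact ih u seen hs hn
    · rw [if_neg h]
      refine ih _ _ ?_ ?_
      · rw [PySem.Set.add, if_neg h, hs]; simp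
      · simp only [List.map_append, List.map_cons, List.map_nil]
        refine List.Nodup.append hn (List.nodup_singleton _) ?_
        intro a ha hb
        simp only [List.mem_singleton] at hb
        subst hb
        have hnot : pvKey c ∉ seen := by simpa [pvContains_iff] using h
        exact hnot (by rw [hs]; exact ha)

-- pass1 over R reduces to walking phase1 of pvSp with early stop
lemma pvPass1_spec (top_k : Int) (R : List PvCtx) :
    ∀ (sel : List PvCtx) (keys : PySem.Set (String × String)) (used : PySem.Set String),
    keys = sel.map pvKey → (∀ c ∈ sel, pvSrc c ∈ used) →
    pvA_pass1 top_k R (sel, keys, used) =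
      (match pvTruncE top_k (pvSp R used).1 sel with
       | Sum.inr r => Sum.inr r
       | Sum.inl sel' => Sum.inl (sel', sel'.map pvKey, (pvSp R used).2.2)) := by
  induction R with
  | nil =>
    intro sel keys used hk hu
    simp [pvA_pass1, pvSp, pvTruncE, hk]
  | cons c rest ih =>
    intro sel keys used hk hu
    simp only [pvA_pass1]
    by_cases hc : pvSrc c ∈ used
    · rw [if_pos (by simp [pvContains_iff, hc])]
      rw [ih sel keys used hk hu]
      have h1 : (pvSp (c :: rest) used).1 = (pvSp rest used).1 := by
        simp [pvSp, pvContains_iff, hc]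
      have h2 : (pvSp (c :: rest) used).2.2 = (pvSp rest used).2.2 := by
        simp [pvSp, pvContains_iff, hc]
      rw [h1, h2]
    · have hkc : pvKey c ∉ keys := by
        rw [hk]
        intro hm
        rcases List.mem_map.mp hm with ⟨c', hc', he⟩
        have hsrc : pvSrc c' = pvSrc c := congrArg Prod.fst he
        exact hc (hsrc ▸ hu c' hc')
      rw [if_neg (by simp [pvContains_iff, hc, hkc])]
      have h1 : (pvSp (c :: rest) used).1 = c :: (pvSp rest (PySem.Set.add used (pvSrc c))).1 := by
        simp [pvSp, pvContains_iff, hc]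
      have h2 : (pvSp (c :: rest) used).2.2 = (pvSp rest (PySem.Set.add used (pvSrc c))).2.2 := by
        simp [pvSp, pvContains_iff, hc]
      rw [h1, h2]
      simp only [pvTruncE]
      by_cases hl : PySem.List.len (sel ++ [c]) ≥ top_k
      · rw [if_pos hl, if_pos hl]
      · rw [if_neg hl, if_neg hl]
        refine ih (sel ++ [c]) _ _ ?_ ?_
        · rw [PySem.Set.add, if_neg (by simpa [pvContains_iff] using hkc), hk]
          simp
        · intro c' hc'
          rcases List.mem_append.mp hc' with h | h
          · exact (PySem.Set.mem_add _ _ _).mpr (Or.inl (hu c' h))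
          · rw [List.mem_singleton.mp h]
            exact (PySem.Set.mem_add _ _ _).mpr (Or.inr rfl)

lemma pvTruncE_inl (top_k : Int) (xs : List PvCtx) :
    ∀ sel s, pvTruncE top_k xs sel = Sum.inl s → s = sel ++ xs := by
  induction xs with
  | nil =>
    intro sel s h
    simp [pvTruncE] at h
    simp [h]
  | cons c rest ih =>
    intro sel s h
    simp only [pvTruncE] at h
    by_cases hl : PySem.List.len (sel ++ [c]) ≥ top_k
    · rw [if_pos hl] at h; cases h
    · rw [if_neg hl] at h
      simpa [List.append_assoc] using ih _ _ h

lemma pvTrunc_append (top_k : Int) (xs : List PvCtx) :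
    ∀ (ys sel : List PvCtx),
    pvB_trunc top_k (xs ++ ys) sel =
      (match pvTruncE top_k xs sel with
       | Sum.inr r => r
       | Sum.inl s => pvB_trunc top_k ys s) := by
  induction xs with
  | nil => intro ys sel; simp [pvTruncE]
  | cons c rest ih =>
    intro ys sel
    simp only [List.cons_append, pvB_trunc, pvTruncE]
    by_cases hl : PySem.List.len (sel ++ [c]) ≥ top_k
    · rw [if_pos hl, if_pos hl]
    · rw [if_neg hl, if_neg hl]
      exact ih ys (sel ++ [c])

-- pass2 with keys K is B's truncation over the elements whose key is not in K
lemma pvPass2_spec (top_k : Int) (R : List PvCtx) :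
    ∀ (sel : List PvCtx) (keys : PySem.Set (String × String)),
    (R.map pvKey).Nodup →
    pvA_pass2 top_k R (sel, keys) =
      pvB_trunc top_k (R.filter (fun c => !(PySem.Set.contains keys (pvKey c)))) sel := by
  induction R with
  | nil => intro sel keys _; simp [pvA_pass2, pvB_trunc]
  | cons c rest ih =>
    intro sel keys hn
    have hn' : (rest.map pvKey).Nodup := (List.nodup_cons.mp (by simpa using hn)).2
    have hhd : pvKey c ∉ rest.map pvKey := (List.nodup_cons.mp (by simpa using hn)).1
    simp only [pvA_pass2, List.filter_cons]
    by_cases hm : pvKey c ∈ keys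
    · rw [if_pos ((pvContains_iff _ _).mpr hm)]
      rw [show (!(PySem.Set.contains keys (pvKey c))) = false by simp [pvContains_iff, hm]]
      simp only [Bool.false_eq_true, if_false]
      exact ih sel keys hn'
    · rw [if_neg (by simpa [pvContains_iff] using hm)]
      rw [show (!(PySem.Set.contains keys (pvKey c))) = true by simp [pvContains_iff, hm]]
      simp only [if_true]
      simp only [pvB_trunc]
      by_cases hl : PySem.List.len (sel ++ [c]) ≥ top_k
      · rw [if_pos hl, if_pos hl]
      · rw [if_neg hl, if_neg hl]
        rw [ih (sel ++ [c]) (PySem.Set.add keys (pvKey c)) hn']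
        congr 1
        refine List.filter_congr ?_
        intro x hx
        have hne : pvKey x ≠ pvKey c := fun he => hhd (he ▸ List.mem_map_of_mem hx)
        simp [pvContains_iff, PySem.Set.mem_add, hne, hm]

lemma pvSp_p1_subset (R : List PvCtx) (used : PySem.Set String) :
    ∀ c ∈ (pvSp R used).1, c ∈ R := by
  induction R generalizing used with
  | nil => simp [pvSp]
  | cons c rest ih =>
    by_cases hc : pvSrc c ∈ used
    · intro x hx
      simp only [pvSp, pvContains_iff, hc, decide_true, if_true] at hx
      exact List.mem_cons_of_mem _ (ih used x hx)
    · simp only [pvSp, pvContains_iff, hc, decide_false, Bool.false_eq_true, if_false]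
      intro x hx
      rcases List.mem_cons.mp hx with rfl | hx
      · exact List.mem_cons_self
      · exact List.mem_cons_of_mem _ (ih _ x hx)

-- the filtered-out-by-phase1-keys list is exactly phase2
lemma pvFilter_p2 (R : List PvCtx) (used : PySem.Set String) :
    (R.map pvKey).Nodup →
    R.filter (fun c => !(PySem.Set.contains ((pvSp R used).1.map pvKey) (pvKey c))) = (pvSp R used).2.1 := by
  induction R generalizing used with
  | nil => simp [pvSp]
  | cons c rest ih =>
    intro hn
    have hn' : (rest.map pvKey).Nodup := (List.nodup_cons.mp (by simpa using hn)).2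
    have hhd : pvKey c ∉ rest.map pvKey := (List.nodup_cons.mp (by simpa using hn)).1
    by_cases hc : pvSrc c ∈ used
    · have h1 : (pvSp (c :: rest) used).1 = (pvSp rest used).1 := by
        simp [pvSp, pvContains_iff, hc]
      have h2 : (pvSp (c :: rest) used).2.1 = c :: (pvSp rest used).2.1 := by
        simp [pvSp, pvContains_iff, hc]
      rw [h1, h2, List.filter_cons]
      have hsub : ∀ x ∈ (pvSp rest used).1, x ∈ rest := pvSp_p1_subset rest used
      have hck : pvKey c ∉ (pvSp rest used).1.map pvKey := fun hmem => by
        rcases List.mem_map.mp hmem with ⟨x, hx, he⟩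
        exact hhd (he ▸ List.mem_map_of_mem (hsub x hx))
      rw [show (!(PySem.Set.contains ((pvSp rest used).1.map pvKey) (pvKey c))) = true by
        simp [pvContains_iff, hck]]
      simp only [if_true]
      rw [ih used hn']
    · have h1 : (pvSp (c :: rest) used).1 = c :: (pvSp rest (PySem.Set.add used (pvSrc c))).1 := by
        simp [pvSp, pvContains_iff, hc]
      have h2 : (pvSp (c :: rest) used).2.1 = (pvSp rest (PySem.Set.add used (pvSrc c))).2.1 := by
        simp [pvSp, pvContains_iff, hc]
      rw [h1, h2, List.filter_cons]
      rw [show (!(PySem.Set.contains ((c :: (pvSp rest (PySem.Set.add used (pvSrc c))).1).map pvKey) (pvKey c))) = false by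
        simp [pvContains_iff]]
      simp only [Bool.false_eq_true, if_false]
      rw [← ih (PySem.Set.add used (pvSrc c)) hn']
      refine List.filter_congr ?_
      intro x hx
      have hne : pvKey x ≠ pvKey c := fun he => hhd (he ▸ List.mem_map_of_mem hx)
      simp [pvContains_iff, hne]

-- firstWrt on a cons
lemma pvFirstWrt_cons_ne (c d : PvCtx) (rest : List PvCtx) (h : pvSrc d ≠ pvSrc c) :
    pvFirstWrt (c :: rest) d = pvFirstWrt rest d := by
  have : (pvSrc c == pvSrc d) = false := by simpa using fun he => h he.symm
  simp [pvFirstWrt, List.find?_cons, this]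

-- phase1/phase2 of pvSp as filters of the scanned list
lemma pvSp_eq_filter (X : List PvCtx) : ∀ (used : PySem.Set String), (X.map pvKey).Nodup →
    (pvSp X used).1 = X.filter (fun c => !(PySem.Set.contains used (pvSrc c)) && pvFirstWrt X c) ∧
    (pvSp X used).2.1 = X.filter (fun c => PySem.Set.contains used (pvSrc c) || !(pvFirstWrt X c)) := by
  induction X with
  | nil => intro used _; simp [pvSp]
  | cons c rest ih =>
    intro used hn
    have hn' : (rest.map pvKey).Nodup := (List.nodup_cons.mp (by simpa using hn)).2
    have hhd : pvKey c ∉ rest.map pvKey := (List.nodup_cons.mp (by simpa using hn)).1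
    have hself : pvFirstWrt (c :: rest) c = true := by simp [pvFirstWrt, List.find?_cons]
    have hsame : ∀ d ∈ rest, pvSrc d = pvSrc c → pvFirstWrt (c :: rest) d = false := by
      intro d hd hsd
      have hne : (pvKey c == pvKey d) = false := by
        simp only [beq_eq_false_iff_ne, ne_eq]
        intro he
        exact hhd (he ▸ List.mem_map_of_mem hd)
      simp [pvFirstWrt, List.find?_cons, hsd, hne]
    by_cases hc : pvSrc c ∈ used
    · have hsp : pvSp (c :: rest) used =
          ((pvSp rest used).1, c :: (pvSp rest used).2.1, (pvSp rest used).2.2) := by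
        simp [pvSp, pvContains_iff, hc]
      obtain ⟨ih1, ih2⟩ := ih used hn'
      constructor
      · rw [hsp, List.filter_cons]
        rw [show (!(PySem.Set.contains used (pvSrc c)) && pvFirstWrt (c :: rest) c) = false by
          simp [pvContains_iff, hc]]
        simp only [Bool.false_eq_true, if_false]
        rw [ih1]
        refine List.filter_congr ?_
        intro d hd
        by_cases hsd : pvSrc d = pvSrc c
        · simp [pvContains_iff, hsd, hc]
        · rw [pvFirstWrt_cons_ne c d rest hsd]
      · rw [hsp, List.filter_cons]
        rw [show (PySem.Set.contains used (pvSrc c) || !(pvFirstWrt (c :: rest) c)) = true by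
          simp [pvContains_iff, hc]]
        simp only [if_true]
        rw [ih2]
        congr 1
        refine List.filter_congr ?_
        intro d hd
        by_cases hsd : pvSrc d = pvSrc c
        · simp [pvContains_iff, hsd, hc]
        · rw [pvFirstWrt_cons_ne c d rest hsd]
    · have hsp : pvSp (c :: rest) used =
          (c :: (pvSp rest (PySem.Set.add used (pvSrc c))).1,
           (pvSp rest (PySem.Set.add used (pvSrc c))).2.1,
           (pvSp rest (PySem.Set.add used (pvSrc c))).2.2) := by
        simp [pvSp, pvContains_iff, hc]
      obtain ⟨ih1, ih2⟩ := ih (PySem.Set.add used (pvSrc c)) hn'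
      constructor
      · rw [hsp, List.filter_cons]
        rw [show (!(PySem.Set.contains used (pvSrc c)) && pvFirstWrt (c :: rest) c) = true by
          simp [pvContains_iff, hc, hself]]
        simp only [if_true]
        rw [ih1]
        congr 1
        refine List.filter_congr ?_
        intro d hd
        by_cases hsd : pvSrc d = pvSrc c
        · rw [hsame d hd hsd]
          have : pvSrc d ∈ PySem.Set.add used (pvSrc c) :=
            (PySem.Set.mem_add _ _ _).mpr (Or.inr hsd)
          simp [pvContains_iff, this]
        · rw [pvFirstWrt_cons_ne c d rest hsd]
          have : (pvSrc d ∈ PySem.Set.add used (pvSrc c)) ↔ pvSrc d ∈ used := by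
            rw [PySem.Set.mem_add]
            exact or_iff_left hsd
          by_cases hd' : pvSrc d ∈ used <;> simp [pvContains_iff, this, hd']
      · rw [hsp, List.filter_cons]
        rw [show (PySem.Set.contains used (pvSrc c) || !(pvFirstWrt (c :: rest) c)) = false by
          simp [pvContains_iff, hc, hself]]
        simp only [Bool.false_eq_true, if_false]
        rw [ih2]
        refine List.filter_congr ?_
        intro d hd
        by_cases hsd : pvSrc d = pvSrc c
        · rw [hsame d hd hsd]
          have : pvSrc d ∈ PySem.Set.add used (pvSrc c) :=
            (PySem.Set.mem_add _ _ _).mpr (Or.inr hsd)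
          simp [pvContains_iff, this]
        · rw [pvFirstWrt_cons_ne c d rest hsd]
          have : (pvSrc d ∈ PySem.Set.add used (pvSrc c)) ↔ pvSrc d ∈ used := by
            rw [PySem.Set.mem_add]
            exact or_iff_left hsd
          by_cases hd' : pvSrc d ∈ used <;> simp [pvContains_iff, this, hd']

-- find? for a source-match commutes with a source-determined filter
lemma pvFind_filter (g : PvCtx → Bool) (hg : ∀ a b, pvSrc a = pvSrc b → g a = g b)
    (c : PvCtx) (hc : g c = true) (u : List PvCtx) :
    (u.filter g).find? (fun d => pvSrc d == pvSrc c) = u.find? (fun d => pvSrc d == pvSrc c) := by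
  induction u with
  | nil => simp
  | cons a rest ih =>
    by_cases ha : pvSrc a = pvSrc c
    · have hga : g a = true := (hg a c ha).trans hc
      simp [List.filter_cons, hga, List.find?_cons, ha]
    · have ha' : (pvSrc a == pvSrc c) = false := by simpa using ha
      by_cases hga : g a = true
      · simp [List.filter_cons, hga, List.find?_cons, ha', ih]
      · simp only [List.filter_cons, hga, Bool.false_eq_true, if_false] at *
        rw [List.find?_cons_of_neg (by simp [ha'])]
        exact ih

lemma pvFirstWrt_filter (g : PvCtx → Bool) (hg : ∀ a b, pvSrc a = pvSrc b → g a = g b)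
    (c : PvCtx) (hc : g c = true) (u : List PvCtx) :
    pvFirstWrt (u.filter g) c = pvFirstWrt u c := by
  unfold pvFirstWrt
  rw [pvFind_filter g hg c hc u]

-- the rep dict never overwrites
lemma pvRep_get?_stable (rest : List PvCtx) : ∀ (d : PySem.Dict String String) (s : String),
    d.contains s = true → (pvB_rep rest d).get? s = d.get? s := by
  induction rest with
  | nil => intro d s _; rfl
  | cons c r ih =>
    intro d s hs
    simp only [pvB_rep]
    by_cases h : d.contains (pvSrc c) = true
    · rw [if_pos h]; exact ih d s hs
    · rw [if_neg h]
      have hne : s ≠ pvSrc c := fun he => h (he ▸ hs)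
      rw [ih _ s (by simp [PySem.Dict.contains_insert, hs]),
        PySem.Dict.get?_insert_of_ne d (pvChunk c) hne]

-- rep lookup = chunk of the first context with that source
lemma pvRep_get? (u : List PvCtx) : ∀ (d : PySem.Dict String String) (s : String),
    d.contains s = false →
    (pvB_rep u d).get? s = (u.find? (fun e => pvSrc e == s)).map pvChunk := by
  induction u with
  | nil =>
    intro d s hs
    simp only [pvB_rep, List.find?_nil, Option.map_none]
    exact (PySem.Dict.get?_eq_none_iff_contains d s).mpr hs
  | cons c rest ih =>
    intro d s hs
    simp only [pvB_rep]
    by_cases h : d.contains (pvSrc c) = true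
    · rw [if_pos h]
      have hne : (pvSrc c == s) = false := by
        simp only [beq_eq_false_iff_ne, ne_eq]
        intro he
        rw [he] at h
        exact absurd h (by simp [hs])
      rw [List.find?_cons_of_neg (by simp [hne])]
      exact ih d s hs
    · rw [if_neg h]
      by_cases hsc : pvSrc c = s
      · subst hsc
        rw [List.find?_cons_of_pos (by simp)]
        rw [pvRep_get?_stable rest _ _ (by simp [PySem.Dict.contains_insert])]
        simp [PySem.Dict.get?_insert_self]
      · have hne : (pvSrc c == s) = false := by simpa using hsc
        rw [List.find?_cons_of_neg (by simp [hne])]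
        refine ih _ s ?_
        have hne2 : (s == pvSrc c) = false := by
          simpa using fun he => hsc he.symm
        rw [PySem.Dict.contains_insert, hne2, hs]
        rfl

-- B's phase test is pvFirstWrt, for contexts of the list itself
lemma pvPhase_eq_first (u : List PvCtx) (c : PvCtx) (hc : c ∈ u) :
    (PySem.Dict.getD (pvB_rep u PySem.Dict.empty) (pvSrc c) "" == pvChunk c) = pvFirstWrt u c := by
  have hfind : ∃ d, u.find? (fun e => pvSrc e == pvSrc c) = some d := by
    cases h : u.find? (fun e => pvSrc e == pvSrc c) with
    | some d => exact ⟨d, rfl⟩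
    | none =>
      exfalso
      have := List.find?_eq_none.mp h c hc
      simp at this
  obtain ⟨d, hd⟩ := hfind
  have hsrc : (pvSrc d == pvSrc c) = true := by
    have := List.find?_some hd
    simpa using this
  have hget : (pvB_rep u PySem.Dict.empty).get? (pvSrc c) = some (pvChunk d) := by
    rw [pvRep_get? u PySem.Dict.empty (pvSrc c) (by simp), hd]; rfl
  rw [PySem.Dict.getD_eq_get?_getD, hget]
  unfold pvFirstWrt
  rw [hd]
  simp only [Option.map_some, Option.getD_some, Option.getD_some]
  show (pvChunk d == pvChunk c) = (pvKey d == pvKey c)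
  have hsrc' : pvSrc d = pvSrc c := by simpa using hsrc
  by_cases hch : pvChunk d = pvChunk c
  · simp [pvKey, hsrc', hch]
  · simp [pvKey, Prod.ext_iff, hsrc', hch]

-- insertBy goes past a block x is not before
lemma pvInsertBy_append {α : Type} (bef : α → α → Bool) (x : α) (as bs : List α)
    (h : ∀ a ∈ as, bef x a = false) :
    PySem.List.insertBy bef x (as ++ bs) = as ++ PySem.List.insertBy bef x bs := by
  induction as with
  | nil => simp
  | cons a rest ih =>
    have ha : bef x a = false := h a List.mem_cons_self
    simp only [List.cons_append, PySem.List.insertBy, ha, Bool.false_eq_true, if_false]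
    rw [ih (fun b hb => h b (List.mem_cons_of_mem _ hb))]

-- insertBy lands at the head of a block x is before everything of
lemma pvInsertBy_all_before {α : Type} (bef : α → α → Bool) (x : α) (bs : List α)
    (h : ∀ b ∈ bs, bef x b = true) :
    PySem.List.insertBy bef x bs = x :: bs := by
  cases bs with
  | nil => rfl
  | cons b rest =>
    have hb : bef x b = true := h b List.mem_cons_self
    simp [PySem.List.insertBy, hb]

-- STABILITY of sorted for a {0,1,2,3}-valued key: the four classes in order, original order inside
lemma pvSortedBuckets {α : Type} (key : α → Int)
    (h : ∀ x, key x = 0 ∨ key x = 1 ∨ key x = 2 ∨ key x = 3) (xs : List α) :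
    PySem.List.sorted xs key false =
      xs.filter (fun c => key c == 0) ++ xs.filter (fun c => key c == 1) ++
      xs.filter (fun c => key c == 2) ++ xs.filter (fun c => key c == 3) := by
  induction xs using List.reverseRecOn with
  | nil => simp [PySem.List.sorted_eq_foldl_insertBy]
  | append_singleton xs x ih =>
    have hstep : PySem.List.sorted (xs ++ [x]) key false =
        PySem.List.insertBy (fun a b => decide (key a < key b)) x (PySem.List.sorted xs key false) := by
      rw [PySem.List.sorted_eq_foldl_insertBy, PySem.List.sorted_eq_foldl_insertBy, List.foldl_append]
      rfl
    have hf : ∀ (i : Int) (y : α), y ∈ xs.filter (fun c => key c == i) → key y = i := by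
      intro i y hy
      have := (List.mem_filter.mp hy).2
      simpa using this
    rw [hstep, ih]
    rcases h x with hv | hv | hv | hv
    · rw [show xs.filter (fun c => key c == 0) ++ xs.filter (fun c => key c == 1) ++
          xs.filter (fun c => key c == 2) ++ xs.filter (fun c => key c == 3) =
          xs.filter (fun c => key c == 0) ++ (xs.filter (fun c => key c == 1) ++
          xs.filter (fun c => key c == 2) ++ xs.filter (fun c => key c == 3)) by
        simp [List.append_assoc]]
      rw [pvInsertBy_append _ _ (xs.filter (fun c => key c == 0)) _
        (fun a ha => by simp [hv, hf 0 a ha])]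
      rw [pvInsertBy_all_before _ _ _ (fun b hb => by
        rcases List.mem_append.mp hb with hb' | hb'
        · rcases List.mem_append.mp hb' with hb'' | hb''
          · simp [hv, hf 1 b hb'']
          · simp [hv, hf 2 b hb'']
        · simp [hv, hf 3 b hb'])]
      simp [List.filter_append, List.filter_cons, hv, List.append_assoc]
    · rw [show xs.filter (fun c => key c == 0) ++ xs.filter (fun c => key c == 1) ++
          xs.filter (fun c => key c == 2) ++ xs.filter (fun c => key c == 3) =
          (xs.filter (fun c => key c == 0) ++ xs.filter (fun c => key c == 1)) ++
          (xs.filter (fun c => key c == 2) ++ xs.filter (fun c => key c == 3)) by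
        simp [List.append_assoc]]
      rw [pvInsertBy_append _ _ _ _ (fun a ha => by
        rcases List.mem_append.mp ha with ha' | ha'
        · simp [hv, hf 0 a ha']
        · simp [hv, hf 1 a ha'])]
      rw [pvInsertBy_all_before _ _ _ (fun b hb => by
        rcases List.mem_append.mp hb with hb' | hb'
        · simp [hv, hf 2 b hb']
        · simp [hv, hf 3 b hb'])]
      simp [List.filter_append, List.filter_cons, hv, List.append_assoc]
    · rw [show xs.filter (fun c => key c == 0) ++ xs.filter (fun c => key c == 1) ++
          xs.filter (fun c => key c == 2) ++ xs.filter (fun c => key c == 3) =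
          (xs.filter (fun c => key c == 0) ++ xs.filter (fun c => key c == 1) ++
           xs.filter (fun c => key c == 2)) ++ xs.filter (fun c => key c == 3) by
        simp [List.append_assoc]]
      rw [pvInsertBy_append _ _ _ _ (fun a ha => by
        rcases List.mem_append.mp ha with ha' | ha'
        · rcases List.mem_append.mp ha' with ha'' | ha''
          · simp [hv, hf 0 a ha'']
          · simp [hv, hf 1 a ha'']
        · simp [hv, hf 2 a ha'])]
      rw [pvInsertBy_all_before _ _ _ (fun b hb => by simp [hv, hf 3 b hb])]
      simp [List.filter_append, List.filter_cons, hv, List.append_assoc]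
    · rw [PySem.List.insertBy_of_forall_not_before _ _ _ (fun a ha => by
        rcases List.mem_append.mp ha with ha' | ha'
        · rcases List.mem_append.mp ha' with ha'' | ha''
          · rcases List.mem_append.mp ha'' with h3 | h3
            · simp [hv, hf 0 a h3]
            · simp [hv, hf 1 a h3]
          · simp [hv, hf 2 a ha'']
        · simp [hv, hf 3 a ha'])]
      simp [List.filter_append, List.filter_cons, hv, List.append_assoc]

-- ===== VERDICT (by name: the statement is the Claim_ definition above) =====
theorem promote_preferred_sources_py_spec : Claim_equal_promote_preferred_sources_py := by
  unfold Claim_equal_promote_preferred_sources_py Spec_promote_preferred_sources_py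
  intro contexts preferred_sources top_k _
  unfold promote_preferred_sources_py promote_preferred_sources_py_alt
  by_cases hempty : contexts = []
  · rw [if_pos hempty, if_pos hempty]
  · rw [if_neg hempty, if_neg hempty]
    dsimp only
    have huniq : (pvB_dedup contexts PySem.Dict.empty).values = (pvA_dedup contexts ([], PySem.Set.empty)).1 :=
      (pvDedup_eq contexts [] PySem.Set.empty PySem.Dict.empty rfl rfl).symm
    have hnu : ((pvA_dedup contexts ([], PySem.Set.empty)).1.map pvKey).Nodup :=
      pvDedup_nodup contexts [] PySem.Set.empty rfl (by simp)
    set u := (pvA_dedup contexts ([], PySem.Set.empty)).1 with hu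
    rw [huniq]
    by_cases hps : pvPset preferred_sources = []
    · rw [if_pos hps, if_pos hps]
    · rw [if_neg hps, if_neg hps]
      set pset := pvPset preferred_sources with hpsdef
      rw [pvPartition_fold pset u [] []]
      dsimp only
      simp only [List.nil_append]
      set prefB : PvCtx → Bool := fun c => PySem.Set.contains pset (pvSrc c) with hprefB
      set pref := u.filter prefB with hpref
      set oth := u.filter (fun c => !(prefB c)) with hoth
      set R := pref ++ oth with hR
      -- nodup keys of the pieces
      have hnP : (pref.map pvKey).Nodup :=
        hnu.sublist ((List.filter_sublist).map pvKey)
      have hnO : (oth.map pvKey).Nodup :=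
        hnu.sublist ((List.filter_sublist).map pvKey)
      have hnR : (R.map pvKey).Nodup :=
        (List.Perm.nodup_iff ((List.filter_append_perm _ u).map pvKey)).mpr hnu
      set s1 := pvSp pref PySem.Set.empty with hs1
      set s2 := pvSp oth s1.2.2 with hs2
      have hsp : pvSp R PySem.Set.empty = (s1.1 ++ s2.1, s1.2.1 ++ s2.2.1, s2.2.2) := by
        rw [hR, pvSp_append, ← hs1, ← hs2]
      -- sources of oth never meet the seen-set left by pref
      have hOdisj : ∀ c ∈ oth, PySem.Set.contains s1.2.2 (pvSrc c) = false := by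
        intro c hc
        rw [← Bool.not_eq_true, pvContains_iff]
        intro hmem
        rcases pvSp_used_sub pref PySem.Set.empty (pvSrc c) hmem with h' | h'
        · simp [PySem.Set.empty] at h'
        · rcases List.mem_map.mp h' with ⟨d, hd, hde⟩
          have hgd : prefB d = true := (List.mem_filter.mp hd).2
          have hgc : prefB c = false := by
            have := (List.mem_filter.mp hc).2
            simpa using this
          simp only [hprefB] at hgd hgc
          rw [hde] at hgd
          rw [hgd] at hgc
          cases hgc
      -- source-determinedness of prefB
      have hgdet : ∀ a b : PvCtx, pvSrc a = pvSrc b → prefB a = prefB b := by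
        intro a b hab; rw [hprefB]; dsimp only; rw [hab]
      have hgdet' : ∀ a b : PvCtx, pvSrc a = pvSrc b → (!(prefB a)) = (!(prefB b)) := by
        intro a b hab; rw [hgdet a b hab]
      -- the four pieces as filters of u
      have hS1a : s1.1 = u.filter (fun c => prefB c && pvFirstWrt u c) := by
        rw [hs1, (pvSp_eq_filter pref PySem.Set.empty hnP).1]
        have h1 : pref.filter (fun c => !(PySem.Set.contains PySem.Set.empty (pvSrc c)) && pvFirstWrt pref c)
            = pref.filter (fun c => pvFirstWrt u c) := by
          refine List.filter_congr ?_
          intro c hc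
          have hgc : prefB c = true := (List.mem_filter.mp hc).2
          rw [hpref, pvFirstWrt_filter prefB hgdet c hgc u]
          simp [PySem.Set.contains]
        rw [h1, hpref, List.filter_filter]
        exact List.filter_congr (fun c _ => by rw [Bool.and_comm])
      have hS1b : s1.2.1 = u.filter (fun c => prefB c && !(pvFirstWrt u c)) := by
        rw [hs1, (pvSp_eq_filter pref PySem.Set.empty hnP).2]
        have h1 : pref.filter (fun c => PySem.Set.contains PySem.Set.empty (pvSrc c) || !(pvFirstWrt pref c))
            = pref.filter (fun c => !(pvFirstWrt u c)) := by
          refine List.filter_congr ?_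
          intro c hc
          have hgc : prefB c = true := (List.mem_filter.mp hc).2
          rw [hpref, pvFirstWrt_filter prefB hgdet c hgc u]
          simp [PySem.Set.contains]
        rw [h1, hpref, List.filter_filter]
        exact List.filter_congr (fun c _ => by rw [Bool.and_comm])
      have hS2a : s2.1 = u.filter (fun c => !(prefB c) && pvFirstWrt u c) := by
        rw [hs2, (pvSp_eq_filter oth s1.2.2 hnO).1]
        have h1 : oth.filter (fun c => !(PySem.Set.contains s1.2.2 (pvSrc c)) && pvFirstWrt oth c)
            = oth.filter (fun c => pvFirstWrt u c) := by
          refine List.filter_congr ?_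
          intro c hc
          have hgc : (!(prefB c)) = true := by
            have := (List.mem_filter.mp hc).2
            simpa using this
          rw [hoth, pvFirstWrt_filter _ hgdet' c hgc u, hOdisj c hc]
          simp
        rw [h1, hoth, List.filter_filter]
        exact List.filter_congr (fun c _ => by rw [Bool.and_comm])
      have hS2b : s2.2.1 = u.filter (fun c => !(prefB c) && !(pvFirstWrt u c)) := by
        rw [hs2, (pvSp_eq_filter oth s1.2.2 hnO).2]
        have h1 : oth.filter (fun c => PySem.Set.contains s1.2.2 (pvSrc c) || !(pvFirstWrt oth c))
            = oth.filter (fun c => !(pvFirstWrt u c)) := by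
          refine List.filter_congr ?_
          intro c hc
          have hgc : (!(prefB c)) = true := by
            have := (List.mem_filter.mp hc).2
            simpa using this
          rw [hoth, pvFirstWrt_filter _ hgdet' c hgc u, hOdisj c hc]
          simp
        rw [h1, hoth, List.filter_filter]
        exact List.filter_congr (fun c _ => by rw [Bool.and_comm])
      -- B's sorted list equals phase1 ++ phase2 of pvSp over R
      set rep := pvB_rep u PySem.Dict.empty with hrep
      set key : PvCtx → Int := pvB_prio pset rep with hkey
      have hk4 : ∀ x, key x = 0 ∨ key x = 1 ∨ key x = 2 ∨ key x = 3 := by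
        intro x
        rw [hkey]
        unfold pvB_prio
        by_cases h1 : (PySem.Dict.getD rep (pvSrc x) "" == pvChunk x) = true <;>
          by_cases h2 : pvSrc x ∈ pset <;>
            (simp [pvContains_iff, h1, h2]; try omega)
      have hbucket : ∀ c ∈ u,
          ((key c == 0) = (prefB c && pvFirstWrt u c)) ∧
          ((key c == 1) = (!(prefB c) && pvFirstWrt u c)) ∧
          ((key c == 2) = (prefB c && !(pvFirstWrt u c))) ∧
          ((key c == 3) = (!(prefB c) && !(pvFirstWrt u c))) := by
        intro c hc
        have hph := pvPhase_eq_first u c hc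
        have hph' : (PySem.Dict.getD rep (pvSrc c) "" == pvChunk c) = pvFirstWrt u c := by
          rw [hrep]; exact hph
        rw [hkey]
        unfold pvB_prio
        rw [hph']
        simp only [hprefB]
        by_cases h1 : pvFirstWrt u c = true <;>
          by_cases h2 : pvSrc c ∈ pset <;>
            (simp [pvContains_iff, h1, h2]; try decide)
      have hsort : PySem.List.sorted u key false = (s1.1 ++ s2.1) ++ (s1.2.1 ++ s2.2.1) := by
        rw [pvSortedBuckets key hk4 u]
        rw [hS1a, hS1b, hS2a, hS2b]
        rw [List.filter_congr (fun c hc => (hbucket c hc).1),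
          List.filter_congr (fun c hc => (hbucket c hc).2.1),
          List.filter_congr (fun c hc => (hbucket c hc).2.2.1),
          List.filter_congr (fun c hc => (hbucket c hc).2.2.2)]
        simp [List.append_assoc]
      rw [hsort]
      -- now both sides are truncations of (s1.1 ++ s2.1) ++ (s1.2.1 ++ s2.2.1)
      rw [pvPass1_spec top_k pref [] PySem.Set.empty PySem.Set.empty rfl (by simp [PySem.Set.empty]),
        ← hs1]
      rcases h1 : pvTruncE top_k s1.1 [] with t | r
      · have ht : t = s1.1 := by simpa using pvTruncE_inl top_k s1.1 [] t h1
        subst ht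
        dsimp only
        rw [List.append_assoc, pvTrunc_append top_k s1.1 (s2.1 ++ (s1.2.1 ++ s2.2.1)) [], h1]
        dsimp only
        rw [pvPass1_spec top_k oth s1.1 (s1.1.map pvKey) s1.2.2 rfl
              (by rw [hs1]; exact pvSp_p1_src_mem pref PySem.Set.empty), ← hs2]
        rcases h2 : pvTruncE top_k s2.1 s1.1 with t2 | r2
        · have ht2 : t2 = s1.1 ++ s2.1 := pvTruncE_inl top_k s2.1 s1.1 t2 h2
          dsimp only
          rw [pvTrunc_append top_k s2.1 (s1.2.1 ++ s2.2.1) s1.1, h2]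
          dsimp only
          rw [pvPass2_spec top_k (pref ++ oth) t2 (t2.map pvKey) hnR, ht2]
          have h3 := pvFilter_p2 (pref ++ oth) PySem.Set.empty hnR
          rw [show pvSp (pref ++ oth) PySem.Set.empty = (s1.1 ++ s2.1, s1.2.1 ++ s2.2.1, s2.2.2) from hsp] at h3
          dsimp only at h3
          rw [h3]
        · dsimp only
          rw [pvTrunc_append top_k s2.1 (s1.2.1 ++ s2.2.1) s1.1, h2]
      · dsimp only
        rw [List.append_assoc, pvTrunc_append top_k s1.1 (s2.1 ++ (s1.2.1 ++ s2.2.1)) [], h1]
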